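-- pv_equiv track=rewrite | github.com/datgeezus/aocsolutions | 2022/py/day9.py | get_head_coords
-- ===== SOURCE A (Python) =====
-- Coord = tuple[int,int]
--
-- def get_head_coords(steps: list[tuple[str,int]]) -> list[Coord]:
--     x = 0
--     y = 0
--     moves = {
--         "L":(-1,0),
--         "R":(1,0),
--         "U":(0,1),
--         "D":(0,-1)
--     }
--
--     visited = []
--     visited.append((x,y))
--     for cmd,n in steps:
--         dx,dy = moves[cmd]
--         for _ in range(n):
--             x += dx
--             y += dy
--             visited.append((x,y))
--
--     return visited
-- ===== SOURCE B (Python) =====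
-- def get_head_coords(steps):
--     moves = {"L": (-1, 0), "R": (1, 0), "U": (0, 1), "D": (0, -1)}
--     # phase 1: flatten the steps into a stream of unit deltas
--     deltas = [moves[cmd] for cmd, n in steps for _ in range(n)]
--     # phase 2: prefix-sum the delta stream starting from the origin
--     traj = [(0, 0)]
--     for dx, dy in deltas:
--         px, py = traj[-1]
--         traj.append((px + dx, py + dy))
--     return traj
-- ===== Notes on version B (the rewrite author's own statement) =====
-- stated objective: alternative
-- what changed: A interleaves coordinate mutation inside nested loops; B first flattens the steps into a flat stream of unit delta vectors and then produces the trajectory as a single prefix-sum pass over that stream.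
import Mathlib
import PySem

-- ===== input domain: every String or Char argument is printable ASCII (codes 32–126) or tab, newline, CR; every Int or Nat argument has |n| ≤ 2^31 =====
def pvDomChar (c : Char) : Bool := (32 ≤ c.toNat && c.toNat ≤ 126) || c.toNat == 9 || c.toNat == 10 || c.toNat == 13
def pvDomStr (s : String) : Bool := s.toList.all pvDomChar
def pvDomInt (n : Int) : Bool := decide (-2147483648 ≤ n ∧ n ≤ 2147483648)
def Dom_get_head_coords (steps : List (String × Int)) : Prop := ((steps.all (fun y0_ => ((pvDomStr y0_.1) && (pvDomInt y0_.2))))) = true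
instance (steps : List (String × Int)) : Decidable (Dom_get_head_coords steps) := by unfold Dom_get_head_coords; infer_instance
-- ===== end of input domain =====

-- B re-decomposes A's nested mutation loops into two phases: flatten the steps to a
-- stream of unit deltas, then prefix-sum that stream into the trajectory (return value only).

-- ===== PORT A =====
-- the literal dict `moves` (shared by both ports: both Pythons spell out the same literal)
def pvMoves : PySem.Dict String (Int × Int) :=
  ((((PySem.Dict.empty).insert "L" (-1, 0)).insert "R" (1, 0)).insert "U" (0, 1)).insert "D" (0, -1)

-- inner `for _ in range(n)` loop: mutates x, y and appends to visited
def pvInnerA (dx dy : Int) : Nat → Int → Int → List (Int × Int) → Int × Int × List (Int × Int)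
  | 0, x, y, v => (x, y, v)
  | k + 1, x, y, v => pvInnerA dx dy k (x + dx) (y + dy) (v ++ [(x + dx, y + dy)])

-- outer `for cmd, n in steps` loop
def pvLoopA : List (String × Int) → Int → Int → List (Int × Int) → List (Int × Int)
  | [], _, _, v => v
  | (cmd, n) :: rest, x, y, v =>
    -- moves[cmd]: KeyError (excluded by Pre_) is totalised with getD; Pre_ keeps inputs where it never fires
    let d := pvMoves.getD cmd (0, 0)
    let r := pvInnerA d.1 d.2 n.toNat x y v
    pvLoopA rest r.1 r.2.1 r.2.2

def get_head_coords (steps : List (String × Int)) : List (Int × Int) :=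
  pvLoopA steps 0 0 [(0, 0)]

-- ===== PORT B =====
-- phase 1: [moves[cmd] for cmd, n in steps for _ in range(n)]
def pvDeltas (steps : List (String × Int)) : List (Int × Int) :=
  steps.flatMap (fun p => (PySem.List.pyRange 0 p.2 1).map (fun _ => pvMoves.getD p.1 (0, 0)))

-- phase 2: the prefix-sum loop appending traj[-1] + delta
def pvScanB : List (Int × Int) → List (Int × Int) → List (Int × Int)
  | [], traj => traj
  | d :: ds, traj =>
    let p := PySem.List.pyGetD traj (-1) (0, 0)
    pvScanB ds (traj ++ [(p.1 + d.1, p.2 + d.2)])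

def get_head_coords_alt (steps : List (String × Int)) : List (Int × Int) :=
  pvScanB (pvDeltas steps) [(0, 0)]

-- ===== PRECONDITION & SPEC =====
-- Pre_ excludes exactly the inputs where Python A raises KeyError: a command outside {"L","R","U","D"}
def Pre_get_head_coords (steps : List (String × Int)) : Prop :=
  ∀ p ∈ steps, p.1 = "L" ∨ p.1 = "R" ∨ p.1 = "U" ∨ p.1 = "D"
instance (steps : List (String × Int)) : Decidable (Pre_get_head_coords steps) := by
  unfold Pre_get_head_coords; infer_instance

def pvWitness_get_head_coords : (List (String × Int)) := [("R", 2), ("U", 1), ("L", 0)]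

def Spec_get_head_coords (steps : List (String × Int)) (out : List (Int × Int)) : Prop := out = get_head_coords_alt steps
instance (steps : List (String × Int)) (out : List (Int × Int)) : Decidable (Spec_get_head_coords steps out) := by unfold Spec_get_head_coords; infer_instance

-- ===== CLAIM (what is proved, stated in full; the proofs are below) =====
def Claim_equal_get_head_coords : Prop := ∀ (steps : List (String × Int)), Dom_get_head_coords steps → Pre_get_head_coords steps → Spec_get_head_coords steps (get_head_coords steps)

-- ===== LEMMAS AND PROOFS =====

-- the trajectory generated by walking a delta stream from (x, y) (proof-only reference function)
def pvWalk (x y : Int) : List (Int × Int) → List (Int × Int)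
  | [] => []
  | d :: ds => (x + d.1, y + d.2) :: pvWalk (x + d.1) (y + d.2) ds

lemma pvWalk_replicate_append (d : Int × Int) (k : Nat) (x y : Int) (rest : List (Int × Int)) :
    pvWalk x y (List.replicate k d ++ rest)
      = pvWalk x y (List.replicate k d) ++ pvWalk (x + k * d.1) (y + k * d.2) rest := by
  induction k generalizing x y with
  | zero => simp [pvWalk]
  | succ k ih =>
    simp only [List.replicate_succ, List.cons_append, pvWalk, ih]
    have hx : x + d.1 + k * d.1 = x + (k + 1 : Nat) * d.1 := by push_cast; ring
    have hy : y + d.2 + k * d.2 = y + (k + 1 : Nat) * d.2 := by push_cast; ring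
    rw [hx, hy]

lemma pvInnerA_eq (dx dy : Int) (k : Nat) (x y : Int) (v : List (Int × Int)) :
    pvInnerA dx dy k x y v
      = (x + k * dx, y + k * dy, v ++ pvWalk x y (List.replicate k (dx, dy))) := by
  induction k generalizing x y v with
  | zero => simp [pvInnerA, pvWalk]
  | succ k ih =>
    simp only [pvInnerA, ih, List.replicate_succ, pvWalk, List.append_assoc, List.cons_append,
      List.nil_append]
    refine Prod.ext ?_ (Prod.ext ?_ rfl) <;> · push_cast; ring

lemma pvLoopA_eq (steps : List (String × Int)) (x y : Int) (v : List (Int × Int)) :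
    pvLoopA steps x y v = v ++ pvWalk x y (pvDeltas steps) := by
  induction steps generalizing x y v with
  | nil => simp [pvLoopA, pvDeltas, pvWalk]
  | cons p rest ih =>
    obtain ⟨cmd, n⟩ := p
    have hconst : (PySem.List.pyRange 0 n 1).map (fun _ => pvMoves.getD cmd (0, 0))
        = List.replicate n.toNat (pvMoves.getD cmd (0, 0)) := by
      rw [List.map_const']
      simp [PySem.List.length_pyRange_one]
    simp only [pvLoopA, pvInnerA_eq, pvDeltas, List.flatMap_cons, hconst, ih,
      List.append_assoc, Prod.mk.eta, pvWalk_replicate_append]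

lemma pvScanB_eq (ds : List (Int × Int)) (v : List (Int × Int)) (x y : Int) :
    pvScanB ds (v ++ [(x, y)]) = v ++ [(x, y)] ++ pvWalk x y ds := by
  induction ds generalizing v x y with
  | nil => simp [pvScanB, pvWalk]
  | cons d ds ih =>
    simp only [pvScanB, PySem.List.pyGetD_neg_one_append_singleton, pvWalk]
    rw [List.append_assoc v [(x, y)] [(x + d.1, y + d.2)]]
    rw [show [(x, y)] ++ [(x + d.1, y + d.2)] = (x, y) :: [(x + d.1, y + d.2)] from rfl]
    rw [show v ++ (x, y) :: [(x + d.1, y + d.2)] = (v ++ [(x, y)]) ++ [(x + d.1, y + d.2)] by simp]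
    rw [ih]
    simp

-- ===== VERDICT (by name: the statement is the Claim_ definition above) =====
theorem get_head_coords_spec : Claim_equal_get_head_coords := by
  intro steps _ _
  unfold Spec_get_head_coords get_head_coords get_head_coords_alt
  rw [pvLoopA_eq]
  have := pvScanB_eq (pvDeltas steps) [] 0 0
  simpa using this.symm
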